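-- pv_equiv track=rewrite | github.com/gov2-ro/tempo-ins-dump | profiling/categorize_labels.py | categorize_label
-- ===== SOURCE A (Python) =====
-- def categorize_label(label):
--     """
--     Categorize labels based on their content and patterns
--     """
--     label_lower = label.lower()
--
--     # Geographic/Administrative categories
--     if any(word in label_lower for word in ['judete', 'regiuni', 'macroregiuni', 'localitati', 'municipii', 'orase', 'tari', 'romania', 'uniunea europeana', 'zone']):
--         return 'Geographic/Administrative'
--
--     # Demographic categories
--     if any(word in label_lower for word in ['ani', 'sexe', 'grupe de varsta', 'varsta', 'populatie', 'persoane', 'nascuti', 'decedati', 'casatorii', 'divorturi']):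
--         return 'Demographics'
--
--     # Time-related categories
--     if any(word in label_lower for word in ['perioade', 'luni', 'trimestre', 'ani/', 'ani de']):
--         return 'Time Period'
--
--     # Economic/Business categories
--     if any(word in label_lower for word in ['caen', 'activitati', 'intreprinderi', 'salariati', 'sectoare', 'industrie', 'comert', 'servicii']):
--         return 'Economic/Business'
--
--     # Education categories
--     if any(word in label_lower for word in ['educatie', 'invatamant', 'scolare', 'nivel de pregatire', 'pregatire']):
--         return 'Education'
--
--     # Measurement units
--     if label_lower.startswith('um:'):
--         return 'Units of Measurement'
--
--     # Health/Medical categories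
--     if any(word in label_lower for word in ['sanatate', 'medical', 'boli', 'maladii', 'sanitare', 'medic']):
--         return 'Health/Medical'
--
--     # Agriculture/Environment
--     if any(word in label_lower for word in ['agricol', 'paduri', 'ape', 'mediu', 'terenuri', 'culturi', 'animale', 'productie agricola']):
--         return 'Agriculture/Environment'
--
--     # Transport/Infrastructure
--     if any(word in label_lower for word in ['transport', 'vehicule', 'drumuri', 'cai ferata', 'nave', 'aeronave']):
--         return 'Transport/Infrastructure'
--
--     # Social categories
--     if any(word in label_lower for word in ['forme de proprietate', 'statut', 'categorii sociale', 'ocupational', 'profesional']):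
--         return 'Social Status'
--
--     # Tourism/Culture
--     if any(word in label_lower for word in ['turistic', 'turisti', 'cultura', 'muzee', 'biblioteci', 'spectacol', 'arte']):
--         return 'Tourism/Culture'
--
--     # Technology/Communication
--     if any(word in label_lower for word in ['internet', 'computer', 'telefonie', 'comunicatii', 'tehnolog']):
--         return 'Technology/Communication'
--
--     # Finance/Economic indicators
--     if any(word in label_lower for word in ['lei', 'euro', 'dolari', 'milioane lei', 'cheltuieli', 'venituri', 'investitii', 'credite']):
--         return 'Finance/Economic Indicators'
--
--     # Living conditions/Housing
--     if any(word in label_lower for word in ['locuinte', 'gospodarii', 'confort', 'dotarea', 'camere']):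
--         return 'Housing/Living Conditions'
--
--     # Categories/Classifications (general)
--     if any(word in label_lower for word in ['categorii de', 'tipuri de', 'clase de', 'grupe de']):
--         return 'Categories/Classifications'
--
--     # Default category for unmatched labels
--     return 'Other'
-- ===== SOURCE B (Python) =====
-- # B: inverted scan — instead of testing each rule's keywords against the label,
-- # slide over the label's substrings once and look each window up in a keyword->priority
-- # hash map, keeping the minimum priority; the 'um:' prefix rule is priority 5.
-- CATS = ['Geographic/Administrative', 'Demographics', 'Time Period', 'Economic/Business',
--         'Education', 'Units of Measurement', 'Health/Medical', 'Agriculture/Environment',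
--         'Transport/Infrastructure', 'Social Status', 'Tourism/Culture',
--         'Technology/Communication', 'Finance/Economic Indicators',
--         'Housing/Living Conditions', 'Categories/Classifications']
--
-- KWS = [
--     ['judete', 'regiuni', 'macroregiuni', 'localitati', 'municipii', 'orase', 'tari', 'romania', 'uniunea europeana', 'zone'],
--     ['ani', 'sexe', 'grupe de varsta', 'varsta', 'populatie', 'persoane', 'nascuti', 'decedati', 'casatorii', 'divorturi'],
--     ['perioade', 'luni', 'trimestre', 'ani/', 'ani de'],
--     ['caen', 'activitati', 'intreprinderi', 'salariati', 'sectoare', 'industrie', 'comert', 'servicii'],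
--     ['educatie', 'invatamant', 'scolare', 'nivel de pregatire', 'pregatire'],
--     [],  # priority 5 is the 'um:' prefix rule, not a substring rule
--     ['sanatate', 'medical', 'boli', 'maladii', 'sanitare', 'medic'],
--     ['agricol', 'paduri', 'ape', 'mediu', 'terenuri', 'culturi', 'animale', 'productie agricola'],
--     ['transport', 'vehicule', 'drumuri', 'cai ferata', 'nave', 'aeronave'],
--     ['forme de proprietate', 'statut', 'categorii sociale', 'ocupational', 'profesional'],
--     ['turistic', 'turisti', 'cultura', 'muzee', 'biblioteci', 'spectacol', 'arte'],
--     ['internet', 'computer', 'telefonie', 'comunicatii', 'tehnolog'],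
--     ['lei', 'euro', 'dolari', 'milioane lei', 'cheltuieli', 'venituri', 'investitii', 'credite'],
--     ['locuinte', 'gospodarii', 'confort', 'dotarea', 'camere'],
--     ['categorii de', 'tipuri de', 'clase de', 'grupe de'],
-- ]
--
-- KW2PRI = {w: p for p, ws in enumerate(KWS) for w in ws}  # keywords are pairwise distinct
-- LENGTHS = sorted({len(w) for w in KW2PRI})
--
--
-- def categorize_label(label):
--     low = label.lower()
--     best = min((KW2PRI[low[i:i + L]] for i in range(len(low)) for L in LENGTHS
--                 if low[i:i + L] in KW2PRI), default=len(CATS))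
--     if low.startswith('um:'):
--         best = min(best, 5)
--     return CATS[best] if best < len(CATS) else 'Other'
-- ===== Notes on version B (the rewrite author's own statement) =====
-- stated objective: alternative
-- what changed: A tests each rule's keyword list against the label with substring searches; B inverts the traversal: it lowercases once, slides over every substring window of the label, looks each window up in a precomputed keyword-to-priority hash map, and returns the category of the minimum priority found (the 'um:' prefix rule contributes priority 5 via one startswith check).
import Mathlib
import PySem

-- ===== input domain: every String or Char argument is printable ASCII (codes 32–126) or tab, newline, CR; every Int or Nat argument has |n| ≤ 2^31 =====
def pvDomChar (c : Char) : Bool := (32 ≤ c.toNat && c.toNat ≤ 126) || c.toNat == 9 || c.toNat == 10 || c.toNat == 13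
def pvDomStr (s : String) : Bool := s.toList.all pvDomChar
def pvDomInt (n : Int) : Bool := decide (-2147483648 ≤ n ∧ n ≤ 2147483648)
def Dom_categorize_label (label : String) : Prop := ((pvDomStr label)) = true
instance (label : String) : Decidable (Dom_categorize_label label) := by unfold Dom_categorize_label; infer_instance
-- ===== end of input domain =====

-- the label's substring windows once and looks each up in a keyword→priority map, taking the minimum
-- priority (objective: alternative; not claimed faster).

-- ===== PORT A =====
def categorize_label (label : String) : String :=
  let label_lower := PySem.Str.lower label
  if ["judete", "regiuni", "macroregiuni", "localitati", "municipii", "orase", "tari", "romania", "uniunea europeana", "zone"].any (fun word => PySem.Str.isIn word label_lower) then "Geographic/Administrative"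
  else if ["ani", "sexe", "grupe de varsta", "varsta", "populatie", "persoane", "nascuti", "decedati", "casatorii", "divorturi"].any (fun word => PySem.Str.isIn word label_lower) then "Demographics"
  else if ["perioade", "luni", "trimestre", "ani/", "ani de"].any (fun word => PySem.Str.isIn word label_lower) then "Time Period"
  else if ["caen", "activitati", "intreprinderi", "salariati", "sectoare", "industrie", "comert", "servicii"].any (fun word => PySem.Str.isIn word label_lower) then "Economic/Business"
  else if ["educatie", "invatamant", "scolare", "nivel de pregatire", "pregatire"].any (fun word => PySem.Str.isIn word label_lower) then "Education"
  else if PySem.Str.startswith label_lower "um:" then "Units of Measurement"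
  else if ["sanatate", "medical", "boli", "maladii", "sanitare", "medic"].any (fun word => PySem.Str.isIn word label_lower) then "Health/Medical"
  else if ["agricol", "paduri", "ape", "mediu", "terenuri", "culturi", "animale", "productie agricola"].any (fun word => PySem.Str.isIn word label_lower) then "Agriculture/Environment"
  else if ["transport", "vehicule", "drumuri", "cai ferata", "nave", "aeronave"].any (fun word => PySem.Str.isIn word label_lower) then "Transport/Infrastructure"
  else if ["forme de proprietate", "statut", "categorii sociale", "ocupational", "profesional"].any (fun word => PySem.Str.isIn word label_lower) then "Social Status"
  else if ["turistic", "turisti", "cultura", "muzee", "biblioteci", "spectacol", "arte"].any (fun word => PySem.Str.isIn word label_lower) then "Tourism/Culture"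
  else if ["internet", "computer", "telefonie", "comunicatii", "tehnolog"].any (fun word => PySem.Str.isIn word label_lower) then "Technology/Communication"
  else if ["lei", "euro", "dolari", "milioane lei", "cheltuieli", "venituri", "investitii", "credite"].any (fun word => PySem.Str.isIn word label_lower) then "Finance/Economic Indicators"
  else if ["locuinte", "gospodarii", "confort", "dotarea", "camere"].any (fun word => PySem.Str.isIn word label_lower) then "Housing/Living Conditions"
  else if ["categorii de", "tipuri de", "clase de", "grupe de"].any (fun word => PySem.Str.isIn word label_lower) then "Categories/Classifications"
  else "Other"

-- ===== PORT B =====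
-- module-level constants of Source B
def pvCats : List String := ["Geographic/Administrative", "Demographics", "Time Period", "Economic/Business",
  "Education", "Units of Measurement", "Health/Medical", "Agriculture/Environment",
  "Transport/Infrastructure", "Social Status", "Tourism/Culture",
  "Technology/Communication", "Finance/Economic Indicators",
  "Housing/Living Conditions", "Categories/Classifications"]

def pvKws : List (List String) := [
  ["judete", "regiuni", "macroregiuni", "localitati", "municipii", "orase", "tari", "romania", "uniunea europeana", "zone"],
  ["ani", "sexe", "grupe de varsta", "varsta", "populatie", "persoane", "nascuti", "decedati", "casatorii", "divorturi"],
  ["perioade", "luni", "trimestre", "ani/", "ani de"],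
  ["caen", "activitati", "intreprinderi", "salariati", "sectoare", "industrie", "comert", "servicii"],
  ["educatie", "invatamant", "scolare", "nivel de pregatire", "pregatire"],
  [],
  ["sanatate", "medical", "boli", "maladii", "sanitare", "medic"],
  ["agricol", "paduri", "ape", "mediu", "terenuri", "culturi", "animale", "productie agricola"],
  ["transport", "vehicule", "drumuri", "cai ferata", "nave", "aeronave"],
  ["forme de proprietate", "statut", "categorii sociale", "ocupational", "profesional"],
  ["turistic", "turisti", "cultura", "muzee", "biblioteci", "spectacol", "arte"],
  ["internet", "computer", "telefonie", "comunicatii", "tehnolog"],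
  ["lei", "euro", "dolari", "milioane lei", "cheltuieli", "venituri", "investitii", "credite"],
  ["locuinte", "gospodarii", "confort", "dotarea", "camere"],
  ["categorii de", "tipuri de", "clase de", "grupe de"]]

-- KW2PRI = {w: p for p, ws in enumerate(KWS) for w in ws}
def pvKwPri : PySem.Dict String Int :=
  PySem.Dict.ofList ((PySem.List.enumerate pvKws).flatMap (fun pw => pw.2.map (fun w => (w, pw.1))))

-- LENGTHS = sorted({len(w) for w in KW2PRI})   (evaluated module constant)
def pvLengths : List Int := [3, 4, 5, 6, 7, 8, 9, 10, 11, 12, 13, 15, 17, 18, 20]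

-- the generator expression of Source B: every KW2PRI hit over all windows low[i:i+L]
def pvCands (low : String) : List Int :=
  (PySem.List.pyRange 0 (PySem.Str.len low) 1).flatMap (fun i =>
    pvLengths.filterMap (fun L => pvKwPri.get? (PySem.Str.slice low (some i) (some (i + L)))))

def categorize_label_alt (label : String) : String :=
  let low := PySem.Str.lower label
  let best := PySem.List.minD (pvCands low) (fun x => x) (PySem.List.len pvCats)
  let best := if PySem.Str.startswith low "um:" then min best 5 else best
  if best < PySem.List.len pvCats then PySem.List.pyGetD pvCats best "" else "Other"

-- ===== PRECONDITION & SPEC =====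
def Spec_categorize_label (label : String) (out : String) : Prop := out = categorize_label_alt label
instance (label : String) (out : String) : Decidable (Spec_categorize_label label out) := by unfold Spec_categorize_label; infer_instance

-- ===== CLAIM (what is proved, stated in full; the proofs are below) =====
def Claim_equal_categorize_label : Prop := ∀ (label : String), Dom_categorize_label label → Spec_categorize_label label (categorize_label label)

-- ===== LEMMAS AND PROOFS =====

-- rule p fires on low (A's p-th condition): the 'um:' prefix at p = 5, else any keyword substring
def pvMatch (low : String) (p : Nat) : Bool :=
  if p = 5 then PySem.Str.startswith low "um:"
  else (pvKws.getD p []).any (fun w => PySem.Str.isIn w low)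

-- the index of the first rule ≥ k that fires (15 if none): A's chain shape
def pvFirst (low : String) (k : Nat) : Nat :=
  if k < 15 then (if pvMatch low k then k else pvFirst low (k + 1)) else 15
termination_by 15 - k

-- checked facts about the literal tables (all by decide):
set_option maxRecDepth 100000 in
lemma pvF1 : ∀ p ∈ List.range 15, ∀ w ∈ pvKws.getD p [], pvKwPri.get? w = some (p : Int) := by decide
set_option maxRecDepth 100000 in
lemma pvF2 : ∀ q ∈ pvKwPri.items, 0 ≤ q.2 ∧ q.2 < 15 ∧ q.2 ≠ 5 ∧ q.1 ∈ pvKws.getD q.2.toNat []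
    ∧ q.1.toList ≠ [] ∧ (q.1.toList.length : Int) ∈ pvLengths := by decide
set_option maxRecDepth 100000 in
lemma pvF3 : pvKwPri.keys.Nodup := by decide

set_option maxRecDepth 4000 in
lemma pvChainA (label : String) :
    categorize_label label = pvCats.getD (pvFirst (PySem.Str.lower label) 0) "Other" := by
  have st : ∀ (low : String) k, k < 15 → pvFirst low k = if pvMatch low k then k else pvFirst low (k+1) := by
    intro low k hk; rw [pvFirst]; simp [hk]
  have en : ∀ (low : String), pvFirst low 15 = 15 := by intro low; rw [pvFirst]; simp
  unfold categorize_label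
  rw [st _ 0 (by norm_num), st _ 1 (by norm_num), st _ 2 (by norm_num), st _ 3 (by norm_num),
    st _ 4 (by norm_num), st _ 5 (by norm_num), st _ 6 (by norm_num), st _ 7 (by norm_num),
    st _ 8 (by norm_num), st _ 9 (by norm_num), st _ 10 (by norm_num), st _ 11 (by norm_num),
    st _ 12 (by norm_num), st _ 13 (by norm_num), st _ 14 (by norm_num), en]
  simp only [pvMatch, pvKws, pvCats, apply_ite (fun n => List.getD ["Geographic/Administrative", "Demographics", "Time Period", "Economic/Business",
  "Education", "Units of Measurement", "Health/Medical", "Agriculture/Environment",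
  "Transport/Infrastructure", "Social Status", "Tourism/Culture",
  "Technology/Communication", "Finance/Economic Indicators",
  "Housing/Living Conditions", "Categories/Classifications"] n "Other")]
  norm_num

lemma pvF4 : ∀ L ∈ pvLengths, (0:Int) ≤ L := by decide

-- completeness: a keyword hit puts its priority among the candidates
lemma pvMemCands {low : String} {w : String} {p : Int} (hwp : (w, p) ∈ pvKwPri.items)
    (hin : PySem.Str.isIn w low = true) : p ∈ pvCands low := by
  obtain ⟨-, -, -, -, hne, hlen⟩ := pvF2 (w, p) hwp
  obtain ⟨j, hpre⟩ := (PySem.Chars.exists_prefix_drop_iff_isIn w.toList low.toList).mpr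
    (by simpa using hin)
  have hj : j < low.toList.length := by
    by_contra h
    rw [Nat.not_lt] at h
    rw [List.drop_eq_nil_of_le h] at hpre
    exact hne (List.prefix_nil.mp hpre)
  have hslice : (PySem.Str.slice low (some (j : Int))
      (some ((j : Int) + (w.toList.length : Int)))).toList = w.toList := by
    rw [PySem.Str.toList_slice, PySem.Chars.slice_eq_listSlice,
      PySem.List.slice_natCast_add]
    exact (List.prefix_iff_eq_take.mp hpre).symm
  have hsliceS : PySem.Str.slice low (some (j : Int))
      (some ((j : Int) + (w.toList.length : Int))) = w := String.toList_inj.mp hslice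
  unfold pvCands
  refine List.mem_flatMap.mpr ⟨(j : Int), ?_, ?_⟩
  · rw [PySem.List.mem_pyRange_one]
    constructor
    · positivity
    · rw [PySem.Str.len_eq]
      exact_mod_cast hj
  · refine List.mem_filterMap.mpr ⟨(w.toList.length : Int), hlen, ?_⟩
    rw [hsliceS]
    exact (PySem.Dict.get?_eq_some_iff_mem_items pvKwPri w p pvF3).mpr hwp

-- soundness: every candidate comes from a keyword that occurs in low
lemma pvCandsSound {low : String} {q : Int} (hq : q ∈ pvCands low) :
    ∃ w, (w, q) ∈ pvKwPri.items ∧ PySem.Str.isIn w low = true := by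
  unfold pvCands at hq
  obtain ⟨i, hi, h2⟩ := List.mem_flatMap.mp hq
  obtain ⟨L, hL, hget⟩ := List.mem_filterMap.mp h2
  refine ⟨PySem.Str.slice low (some i) (some (i + L)),
    PySem.Dict.mem_items_of_get?_eq_some _ hget, ?_⟩
  have hi0 : (0:Int) ≤ i := (PySem.List.mem_pyRange_one.mp hi).1
  have hL0 : (0:Int) ≤ L := pvF4 L hL
  rw [PySem.Str.isIn_iff_infix, PySem.Str.toList_slice, PySem.Chars.slice_eq_listSlice,
    PySem.List.slice_toNat _ hi0 (by omega : (0:Int) ≤ i + L)]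
  exact ((List.take_prefix _ _).isInfix).trans ((List.drop_suffix _ _).isInfix)

-- the first-firing-rule index: bounds, hit, and minimality
lemma pvFirstSpec (low : String) : ∀ n k, 15 - k ≤ n →
    pvFirst low k ≤ 15 ∧
    (pvFirst low k < 15 → pvMatch low (pvFirst low k) = true) ∧
    (∀ p, k ≤ p → p < pvFirst low k → pvMatch low p = false) := by
  intro n
  induction n with
  | zero =>
    intro k hk
    have h15 : ¬ k < 15 := by omega
    rw [pvFirst, if_neg h15]
    exact ⟨le_refl _, fun h => absurd h (by omega), fun p hp hlt => absurd hlt (by omega)⟩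
  | succ m ih =>
    intro k hk
    by_cases h15 : k < 15
    · rw [pvFirst, if_pos h15]
      by_cases hm : pvMatch low k
      · rw [if_pos hm]
        exact ⟨by omega, fun _ => hm, fun p hp hlt => absurd hlt (by omega)⟩
      · rw [if_neg hm]
        obtain ⟨ih2, ih3, ih4⟩ := ih (k + 1) (by omega)
        refine ⟨ih2, ih3, fun p hp hlt => ?_⟩
        rcases Nat.eq_or_lt_of_le hp with rfl | hp'
        · exact Bool.eq_false_iff.mpr (fun h => hm h)
        · exact ih4 p hp' hlt
    · rw [pvFirst, if_neg h15]
      exact ⟨le_refl _, fun h => absurd h (by omega), fun p hp hlt => absurd hlt (by omega)⟩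

-- B's running minimum, named for the proofs
def pvB0 (low : String) : Int := PySem.List.minD (pvCands low) (fun x => x) (PySem.List.len pvCats)

def pvBest (low : String) : Int :=
  if PySem.Str.startswith low "um:" then min (pvB0 low) 5 else pvB0 low

lemma pvAltEq (label : String) :
    categorize_label_alt label =
      (if pvBest (PySem.Str.lower label) < 15 then
        PySem.List.pyGetD pvCats (pvBest (PySem.Str.lower label)) "" else "Other") := rfl

-- completeness: any firing rule bounds B's minimum
lemma pvBestComplete (low : String) (p : Nat) (hp : p < 15) (hm : pvMatch low p = true) :
    pvBest low ≤ (p : Int) := by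
  by_cases h5 : p = 5
  · subst h5
    have hs : PySem.Str.startswith low "um:" = true := by simpa [pvMatch] using hm
    rw [pvBest, if_pos hs]
    exact le_trans (min_le_right _ _) (by norm_num)
  · have hm' : (pvKws.getD p []).any (fun w => PySem.Str.isIn w low) = true := by
      simpa [pvMatch, h5] using hm
    obtain ⟨w, hw, hin⟩ := List.any_eq_true.mp hm'
    have hget := pvF1 p (List.mem_range.mpr hp) w hw
    have hc := pvMemCands (PySem.Dict.mem_items_of_get?_eq_some _ hget) hin
    have hle : pvB0 low ≤ (p : Int) := by
      rw [pvB0]; exact PySem.List.minD_id_le _ _ _ hc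
    rw [pvBest]
    split
    · exact le_trans (min_le_left _ _) hle
    · exact hle

-- soundness of the candidate minimum
lemma pvB0Sound (low : String) (h : pvB0 low < 15) :
    ∃ p : Nat, (p : Int) = pvB0 low ∧ p < 15 ∧ pvMatch low p = true := by
  have hne : pvCands low ≠ [] := by
    intro he
    rw [pvB0, he, PySem.List.minD_nil] at h
    norm_num [pvCats, PySem.List.len] at h
  have hmem : pvB0 low ∈ pvCands low := by
    rw [pvB0]; exact PySem.List.minD_mem _ _ _ hne
  obtain ⟨w, hwp, hin⟩ := pvCandsSound hmem
  obtain ⟨hge0, hlt, hne5, hwmem, -, -⟩ := pvF2 _ hwp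
  dsimp only at hge0 hlt hne5 hwmem
  refine ⟨(pvB0 low).toNat, by omega, by omega, ?_⟩
  have hnot5 : (pvB0 low).toNat ≠ 5 := by omega
  rw [pvMatch, if_neg hnot5]
  exact List.any_eq_true.mpr ⟨w, hwmem, hin⟩

-- soundness: a small final minimum is realised by a firing rule
lemma pvBestSound (low : String) (h : pvBest low < 15) :
    ∃ p : Nat, (p : Int) = pvBest low ∧ p < 15 ∧ pvMatch low p = true := by
  by_cases hs : PySem.Str.startswith low "um:" = true
  · rw [pvBest, if_pos hs] at h ⊢
    rcases le_total (pvB0 low) 5 with hc | hc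
    · rw [min_eq_left hc] at h ⊢
      exact pvB0Sound low h
    · rw [min_eq_right hc] at h ⊢
      exact ⟨5, by norm_num, by norm_num, by simpa [pvMatch] using hs⟩
  · rw [pvBest, if_neg hs] at h ⊢
    exact pvB0Sound low h

-- ===== VERDICT (by name: the statement is the Claim_ definition above) =====
theorem categorize_label_spec : Claim_equal_categorize_label := by
  intro label _
  unfold Spec_categorize_label
  rw [pvChainA, pvAltEq]
  generalize PySem.Str.lower label = low
  obtain ⟨hf15, hfhit, hfmin⟩ := pvFirstSpec low 15 0 (by omega)
  by_cases hf : pvFirst low 0 < 15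
  · have hble : pvBest low ≤ (pvFirst low 0 : Int) := pvBestComplete low _ hf (hfhit hf)
    have hbf15 : pvBest low < 15 := lt_of_le_of_lt hble (by exact_mod_cast hf)
    obtain ⟨p, hpe, hp15, hpm⟩ := pvBestSound low hbf15
    have hnp : ¬ p < pvFirst low 0 := fun hlt => by
      rw [hfmin p (Nat.zero_le _) hlt] at hpm
      exact Bool.false_ne_true hpm
    have hbe : pvBest low = (pvFirst low 0 : Int) :=
      le_antisymm hble (by rw [← hpe]; exact_mod_cast Nat.le_of_not_lt hnp)
    rw [if_pos hbf15, hbe]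
    have hflen : pvFirst low 0 < pvCats.length := by simpa [pvCats] using hf
    rw [PySem.List.pyGetD_natCast, List.getD_eq_getElem _ _ hflen, List.getD_eq_getElem _ _ hflen]
  · have hfe : pvFirst low 0 = 15 := by omega
    have hnb : ¬ pvBest low < 15 := by
      intro hbf15
      obtain ⟨p, hpe, hp15, hpm⟩ := pvBestSound low hbf15
      rw [hfmin p (Nat.zero_le _) (by omega)] at hpm
      exact Bool.false_ne_true hpm
    rw [if_neg hnb, hfe]
    decide
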